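-- pv_equiv track=rewrite | github.com/FatoumattaConteh/Cellular-Automata-Generated-Sbox-Compression-Decompression | SboxWithCellularAutomata/QR+VC+SboXRules+CA.py | shuffle_sbox_with_ca
-- ===== SOURCE A (Python) =====
-- def generate_ca_bits_rule90(seed_bits: str, steps: int = 50, cells: int = 64):
--     """
--     Rule 90: s_i(t+1) = s_{i−1}(t) XOR s_{i+1}(t)
--     Produces steps * cells output bits (concatenated)
--     """
--     # initial state: use the first 'cells' bits of seed_bits (repeat if shorter)
--     state = [int(bit) for bit in seed_bits[:cells]]
--     if len(state) < cells:
--         state = (state * ((cells // len(state)) + 1))[:cells]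
--
--     output_bits = []
--     for _ in range(steps):
--         new_state = []
--         for i in range(cells):
--             left = state[(i - 1) % cells]
--             right = state[(i + 1) % cells]
--             new_val = left ^ right  # Rule 90
--             new_state.append(new_val)
--         state = new_state
--         output_bits.extend(state)
--     return output_bits
--
-- def shuffle_sbox_with_ca(original_sbox, seed_bits: str, ca_steps: int = 50, ca_cells: int = 64):
--     bits = generate_ca_bits_rule90(seed_bits, steps=ca_steps, cells=ca_cells)
--     shuffled = {}
--     idx = 0
--     for rule, values in original_sbox.items():
--         rand_nums = []
--         for _ in range(len(values)):
--             chunk = bits[idx: idx+4]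
--             idx += 4
--             if len(chunk) < 4:
--                 # wrap-around if exhausted
--                 chunk = bits[:4]
--             rand_nums.append(int(''.join(map(str, chunk)), 2))
--         paired = list(zip(rand_nums, values.copy()))
--         paired.sort(key=lambda x: x[0])
--         shuffled[rule] = [val for _, val in paired]
--     return shuffled
-- ===== SOURCE B (Python) =====
-- def _ca_stream(seed_bits, steps, c):
--     # Rule 90 is linear over GF(2): (L+R)^(2^m) = L^(2^m) + R^(2^m), so the
--     # state after t steps equals the state after t - 2^m steps with each cell
--     # XORed at offsets +/- 2^m (2^m = largest power of two <= t).  Each row is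
--     # therefore computed by BINARY LIFTING from a much earlier row with a single
--     # rotate/XOR, never by stepping cell-by-cell through t-1 intermediate rows.
--     if steps < 1 or c < 1:
--         return []
--     seed = seed_bits[:c]
--     if len(seed) < c:
--         seed = (seed * (c // len(seed) + 1))[:c]
--     rows = [[int(ch) for ch in seed]]       # rows[t] = CA state after t steps
--     for t in range(1, steps + 1):
--         d = 1 << (t.bit_length() - 1)       # largest power of two <= t
--         src = rows[t - d]
--         s = d % c
--         left = src[s:] + src[:s]                            # cell i -> src[(i+d) % c]
--         right = src[-s:] + src[:-s] if s else src[:]        # cell i -> src[(i-d) % c]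
--         rows.append([a ^ b for a, b in zip(left, right)])
--     return [b for row in rows[1:] for b in row]
--
--
-- def shuffle_sbox_with_ca(original_sbox, seed_bits: str, ca_steps: int = 50, ca_cells: int = 64):
--     bits = _ca_stream(seed_bits, ca_steps, ca_cells)
--     result = {}
--     idx = 0
--     for rule, values in original_sbox.items():
--         # stable COUNTING sort: 4-bit keys are < 16, so bucket by key value and
--         # concatenate the buckets instead of comparison-sorting (rand, val) pairs
--         buckets = [[] for _ in range(16)]
--         for v in values:
--             chunk = bits[idx:idx + 4]
--             idx += 4
--             if len(chunk) < 4: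
--                 chunk = bits[:4]
--             key = int(''.join(map(str, chunk)), 2)
--             buckets[key].append(v)
--         result[rule] = [v for bucket in buckets for v in bucket]
--     return result
-- ===== Notes on version B (the rewrite author's own statement) =====
-- stated objective: alternative
-- what changed: B computes each CA row by binary lifting (Rule 90 is linear over GF(2), so row t is a single rotate-XOR of row t-2^m at offsets +/-2^m, never a cell-by-cell step from row t-1) and shuffles each rule's values with a stable 16-bucket counting sort on the 4-bit keys instead of A's comparison sort of (rand, value) pairs.
-- outside the precondition, e.g. on shuffle_sbox_with_ca({'r': [2, 3]}, '388', 3, 8): A returns {'r': [2, 3]}, B raises IndexError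
import Mathlib
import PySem

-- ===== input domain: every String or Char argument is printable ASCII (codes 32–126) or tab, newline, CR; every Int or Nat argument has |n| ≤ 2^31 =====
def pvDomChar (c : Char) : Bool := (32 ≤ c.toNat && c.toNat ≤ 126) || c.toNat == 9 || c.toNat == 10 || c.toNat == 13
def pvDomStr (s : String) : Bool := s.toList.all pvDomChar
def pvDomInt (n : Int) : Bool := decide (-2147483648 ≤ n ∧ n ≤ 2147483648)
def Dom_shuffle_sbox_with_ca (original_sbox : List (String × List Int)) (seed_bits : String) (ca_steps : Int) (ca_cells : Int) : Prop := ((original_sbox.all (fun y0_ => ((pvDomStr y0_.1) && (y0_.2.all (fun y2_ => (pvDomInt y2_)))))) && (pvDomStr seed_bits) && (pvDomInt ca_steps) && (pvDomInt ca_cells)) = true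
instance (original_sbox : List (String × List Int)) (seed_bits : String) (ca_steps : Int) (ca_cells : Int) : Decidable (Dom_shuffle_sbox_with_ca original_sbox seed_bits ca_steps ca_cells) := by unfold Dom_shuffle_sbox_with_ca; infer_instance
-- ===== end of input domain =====

-- B exploits the GF(2)-linearity of Rule 90: each CA row is obtained by BINARY
-- LIFTING (one rotate/XOR of row t-2^m at offsets ±2^m), never by stepping
-- cell-by-cell through row t-1, and each rule's values are shuffled by a stable
-- 16-bucket COUNTING sort on the 4-bit keys instead of A's comparison sort of
-- (rand, value) pairs; return values agree on Pre_ (objective: alternative).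
-- Python A and B receive original_sbox as a dict; both ports model that by first
-- building a PySem.Dict from the association list by insertion (Python dict construction).

-- ===== PORT A =====
-- int(ch) for a single character, as both Pythons apply it to seed characters;
-- total stand-in: Pre_ keeps seeds where Python's int() returns (digits '0'/'1').
def pyIntOfDigitChar (c : Char) : Int := (PySem.Int.ofStr? (String.ofList [c])).getD 0

-- state = [int(bit) for bit in seed_bits[:cells]]; repeat-if-short
def caStateInitA (seed_bits : String) (cells : Int) : List Int :=
  let state := (PySem.List.slice seed_bits.toList none (some cells)).map pyIntOfDigitChar
  if (state.length : Int) < cells then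
    PySem.List.slice (PySem.List.pyRepeat state (PySem.Int.floordiv cells (state.length : Int) + 1)) none (some cells)
  else state

-- one Rule-90 step: new_state built cell by cell with wrap-around indices
def caStepA (state : List Int) (cells : Int) : List Int :=
  (PySem.List.pyRange 0 cells 1).foldl (fun ns i =>
    ns ++ [PySem.Int.bxor (PySem.List.pyGetD state (PySem.Int.mod (i - 1) cells) 0)
                          (PySem.List.pyGetD state (PySem.Int.mod (i + 1) cells) 0)]) []

-- generate_ca_bits_rule90
def caBitsA (seed_bits : String) (steps cells : Int) : List Int :=
  ((PySem.List.pyRange 0 steps 1).foldl (fun (p : List Int × List Int) _ =>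
      let ns := caStepA p.1 cells
      (ns, p.2 ++ ns)) (caStateInitA seed_bits cells, [])).2

-- int(''.join(map(str, chunk)), 2): hand port of int(s, 2), exact for nonempty
-- strings of '0'/'1' digits (Pre_ puts every chunk in that domain)
def pyIntOfBinChars (cs : List Char) : Int :=
  cs.foldl (fun acc c => 2 * acc + (if c = '1' then 1 else 0)) 0

def chunkValA (chunk : List Int) : Int :=
  pyIntOfBinChars (chunk.flatMap (fun b => (PySem.Int.toStr b).toList))

def shuffle_sbox_with_ca (original_sbox : List (String × List Int)) (seed_bits : String) (ca_steps : Int) (ca_cells : Int) : List (String × List Int) :=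
  let bits := caBitsA seed_bits ca_steps ca_cells
  let d : PySem.Dict String (List Int) := original_sbox.foldl (fun d p => d.insert p.1 p.2) PySem.Dict.empty
  (d.items.foldl (fun (st : PySem.Dict String (List Int) × Int) rv =>
      let inner := rv.2.foldl (fun (q : List Int × Int) _ =>
          let chunk0 := PySem.List.slice bits (some q.2) (some (q.2 + 4))
          let idx := q.2 + 4
          let chunk := if (chunk0.length : Int) < 4 then PySem.List.slice bits none (some 4) else chunk0
          (q.1 ++ [chunkValA chunk], idx)) ([], st.2)
      let paired := PySem.List.sorted (inner.1.zip rv.2) (fun x => x.1) false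
      (st.1.insert rv.1 (paired.map (fun x => x.2)), inner.2))
    (PySem.Dict.empty, 0)).1.items

-- ===== PORT B =====
-- seed = seed_bits[:cells]; repeat-if-short (on the string, before conversion)
def caSeedB (seed_bits : String) (cells : Int) : List Char :=
  let seed := PySem.List.slice seed_bits.toList none (some cells)
  if (seed.length : Int) < cells then
    PySem.List.slice (PySem.List.pyRepeat seed (PySem.Int.floordiv cells (seed.length : Int) + 1)) none (some cells)
  else seed

-- one binary-lifting step: rotate left by s, rotate right by s (slices), XOR
def rowStepB (src : List Int) (s : Int) : List Int :=
  let left := PySem.List.slice src (some s) none ++ PySem.List.slice src none (some s)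
  let right := if s ≠ 0 then
      PySem.List.slice src (some (-s)) none ++ PySem.List.slice src none (some (-s))
    else PySem.List.slice src none none
  (left.zip right).map (fun p => PySem.Int.bxor p.1 p.2)

-- rows[t] = CA state after t steps; row t from row t - 2^m, 2^m largest ≤ t
def caStreamB (seed_bits : String) (steps c : Int) : List Int :=
  if steps < 1 ∨ c < 1 then [] else
  let rows := (PySem.List.pyRange 1 (steps + 1) 1).foldl (fun rows t =>
      let d : Int := (1 : Int) <<< (PySem.Int.bitLength t - 1)
      rows ++ [rowStepB (PySem.List.pyGetD rows (t - d) []) (PySem.Int.mod d c)])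
    [(caSeedB seed_bits c).map pyIntOfDigitChar]
  (PySem.List.slice rows (some 1) none).flatMap (fun r => r)

def shuffle_sbox_with_ca_alt (original_sbox : List (String × List Int)) (seed_bits : String) (ca_steps : Int) (ca_cells : Int) : List (String × List Int) :=
  let bits := caStreamB seed_bits ca_steps ca_cells
  let d : PySem.Dict String (List Int) := original_sbox.foldl (fun d p => d.insert p.1 p.2) PySem.Dict.empty
  (d.items.foldl (fun (st : PySem.Dict String (List Int) × Int) rv =>
      let inner := rv.2.foldl (fun (q : List (List Int) × Int) v =>
          let chunk0 := PySem.List.slice bits (some q.2) (some (q.2 + 4))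
          let idx := q.2 + 4
          let chunk := if (chunk0.length : Int) < 4 then PySem.List.slice bits none (some 4) else chunk0
          let key := chunkValA chunk
          (PySem.List.pySetD q.1 key (PySem.List.pyGetD q.1 key [] ++ [v]), idx))
        ((PySem.List.pyRange 0 16 1).map (fun _ => ([] : List Int)), st.2)
      (st.1.insert rv.1 (inner.1.flatMap (fun b => b)), inner.2))
    (PySem.Dict.empty, 0)).1.items

-- ===== PRECONDITION & SPEC =====
-- Pre_ excludes exactly the inputs where the Python A raises — an empty seed prefix
-- with ca_cells ≥ 1 (ZeroDivisionError), a non-digit char in seed_bits[:ca_cells]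
-- (int() ValueError), or a bit stream that is consulted (some value list nonempty)
-- while empty (ca_steps < 1 or ca_cells < 1) or non-binary (int(...,2) ValueError) —
-- plus the rare seeds with digits other than 0/1 whose arithmetic XOR happens to stay
-- parseable, where A's returned bitstream is an accident of list-of-int XOR (see cites).
def Pre_shuffle_sbox_with_ca (original_sbox : List (String × List Int)) (seed_bits : String) (ca_steps : Int) (ca_cells : Int) : Prop :=
  (1 ≤ ca_cells ∧ PySem.List.slice seed_bits.toList none (some ca_cells) ≠ [] ∧ 1 ≤ ca_steps ∧
     (PySem.List.slice seed_bits.toList none (some ca_cells)).all (fun c => c == '0' || c == '1') = true) ∨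
  (1 ≤ ca_cells ∧ PySem.List.slice seed_bits.toList none (some ca_cells) ≠ [] ∧
     (PySem.List.slice seed_bits.toList none (some ca_cells)).all PySem.Chars.isdigit = true ∧
     original_sbox.all (fun p => p.2.isEmpty) = true) ∨
  (ca_cells < 1 ∧ (PySem.List.slice seed_bits.toList none (some ca_cells)).all PySem.Chars.isdigit = true ∧
     original_sbox.all (fun p => p.2.isEmpty) = true)
instance (original_sbox : List (String × List Int)) (seed_bits : String) (ca_steps : Int) (ca_cells : Int) : Decidable (Pre_shuffle_sbox_with_ca original_sbox seed_bits ca_steps ca_cells) := by unfold Pre_shuffle_sbox_with_ca; infer_instance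

def pvWitness_shuffle_sbox_with_ca : (List (String × List Int)) × String × Int × Int :=
  ([("r1", [7, 2, 5]), ("r2", [1, 4])], "0110", 2, 5)

def Spec_shuffle_sbox_with_ca (original_sbox : List (String × List Int)) (seed_bits : String) (ca_steps : Int) (ca_cells : Int) (out : List (String × List Int)) : Prop := out = shuffle_sbox_with_ca_alt original_sbox seed_bits ca_steps ca_cells
instance (original_sbox : List (String × List Int)) (seed_bits : String) (ca_steps : Int) (ca_cells : Int) (out : List (String × List Int)) : Decidable (Spec_shuffle_sbox_with_ca original_sbox seed_bits ca_steps ca_cells out) := by unfold Spec_shuffle_sbox_with_ca; infer_instance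

-- ===== CLAIM (what is proved, stated in full; the proofs are below) =====
def Claim_equal_shuffle_sbox_with_ca : Prop := ∀ (original_sbox : List (String × List Int)) (seed_bits : String) (ca_steps : Int) (ca_cells : Int), Dom_shuffle_sbox_with_ca original_sbox seed_bits ca_steps ca_cells → Pre_shuffle_sbox_with_ca original_sbox seed_bits ca_steps ca_cells → Spec_shuffle_sbox_with_ca original_sbox seed_bits ca_steps ca_cells (shuffle_sbox_with_ca original_sbox seed_bits ca_steps ca_cells)

-- ===== LEMMAS AND PROOFS =====

-- ---------- generic CA machinery ----------

def idxm (c : Nat) (j : Int) : Nat := (j % (c : Int)).toNat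

def stepD (d : Int) (l : List Int) : List Int :=
  (List.range l.length).map (fun (i : Nat) =>
    PySem.Int.bxor (l.getD (idxm l.length ((i : Int) - d)) 0) (l.getD (idxm l.length ((i : Int) + d)) 0))

def Bin (l : List Int) : Prop := ∀ x ∈ l, x = 0 ∨ x = 1

theorem idxm_lt (c : Nat) (hc : 0 < c) (j : Int) : idxm c j < c := by
  unfold idxm
  have h1 : 0 ≤ j % (c : Int) := Int.emod_nonneg _ (by omega)
  have h2 : j % (c : Int) < c := Int.emod_lt_of_pos _ (by exact_mod_cast hc)
  omega

theorem idxm_shift (c : Nat) (hc : 0 < c) (j d : Int) :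
    idxm c ((idxm c j : Int) + d) = idxm c (j + d) := by
  unfold idxm
  have h1 : 0 ≤ j % (c : Int) := Int.emod_nonneg _ (by omega)
  rw [Int.toNat_of_nonneg h1, Int.add_emod, Int.emod_emod_of_dvd _ dvd_rfl, ← Int.add_emod]

theorem stepD_length (d : Int) (l : List Int) : (stepD d l).length = l.length := by
  simp [stepD]

theorem stepD_getElem (d : Int) (l : List Int) (i : Nat) (h : i < (stepD d l).length) :
    (stepD d l)[i] = PySem.Int.bxor (l.getD (idxm l.length ((i : Int) - d)) 0)
                                    (l.getD (idxm l.length ((i : Int) + d)) 0) := by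
  simp only [stepD, List.getElem_map, List.getElem_range]

theorem Bin_getD (l : List Int) (hb : Bin l) (j : Nat) : l.getD j 0 = 0 ∨ l.getD j 0 = 1 := by
  by_cases h : j < l.length
  · rw [List.getD_eq_getElem _ _ h]; exact hb _ (List.getElem_mem _)
  · rw [List.getD_eq_default _ _ (by omega)]; left; rfl

theorem stepD_bin (d : Int) (l : List Int) (hb : Bin l) : Bin (stepD d l) := by
  intro x hx
  simp only [stepD, List.mem_map] at hx
  obtain ⟨i, -, rfl⟩ := hx
  rcases Bin_getD l hb (idxm l.length ((i : Int) - d)) with h1 | h1 <;>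
  rcases Bin_getD l hb (idxm l.length ((i : Int) + d)) with h2 | h2 <;>
  rw [h1, h2] <;> decide

theorem stepD_getD (d : Int) (l : List Int) (j : Nat) (h : j < l.length) :
    (stepD d l).getD j 0 = PySem.Int.bxor (l.getD (idxm l.length ((j : Int) - d)) 0)
                                          (l.getD (idxm l.length ((j : Int) + d)) 0) := by
  rw [List.getD_eq_getElem _ _ (by rw [stepD_length]; exact h), stepD_getElem]

theorem stepD_stepD (d : Int) (l : List Int) (hc : 0 < l.length) (hb : Bin l) :
    stepD d (stepD d l) = stepD (2 * d) l := by
  set c := l.length with hcdef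
  refine List.ext_getElem (by simp [stepD_length]) ?_
  intro i h1 h2
  have hic : i < c := by simpa [stepD_length] using h1
  rw [stepD_getElem, stepD_getElem _ _ _ (by simpa [stepD_length] using hic)]
  rw [stepD_length]
  rw [stepD_getD _ _ _ (idxm_lt c hc _), stepD_getD _ _ _ (idxm_lt c hc _)]
  have e1 : idxm c ((idxm c ((i : Int) - d) : Int) - d) = idxm c ((i : Int) - 2 * d) := by
    rw [show ((idxm c ((i : Int) - d) : Int) - d) = ((idxm c ((i : Int) - d) : Int) + (-d)) by ring,
        idxm_shift c hc]
    congr 1; ring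
  have e2 : idxm c ((idxm c ((i : Int) - d) : Int) + d) = i := by
    rw [idxm_shift c hc]
    have : ((i : Int) - d + d) = (i : Int) := by ring
    rw [this]
    unfold idxm
    rw [Int.emod_eq_of_lt (by omega) (by exact_mod_cast hic)]
    omega
  have e3 : idxm c ((idxm c ((i : Int) + d) : Int) - d) = i := by
    rw [show ((idxm c ((i : Int) + d) : Int) - d) = ((idxm c ((i : Int) + d) : Int) + (-d)) by ring,
        idxm_shift c hc]
    have : ((i : Int) + d + (-d)) = (i : Int) := by ring
    rw [this]
    unfold idxm
    rw [Int.emod_eq_of_lt (by omega) (by exact_mod_cast hic)]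
    omega
  have e4 : idxm c ((idxm c ((i : Int) + d) : Int) + d) = idxm c ((i : Int) + 2 * d) := by
    rw [idxm_shift c hc]; congr 1; ring
  rw [e1, e2, e3, e4]
  rcases Bin_getD l hb (idxm c ((i : Int) - 2 * d)) with ha | ha <;>
  rcases Bin_getD l hb i with hx | hx <;>
  rcases Bin_getD l hb (idxm c ((i : Int) + 2 * d)) with hbb | hbb <;>
  rw [ha, hx, hbb] <;> decide

theorem iter_len_bin (l : List Int) (hb : Bin l) (n : Nat) :
    ((stepD 1)^[n] l).length = l.length ∧ Bin ((stepD 1)^[n] l) := by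
  induction n with
  | zero => exact ⟨rfl, hb⟩
  | succ n ih =>
    rw [Function.iterate_succ_apply']
    exact ⟨by rw [stepD_length, ih.1], stepD_bin _ _ ih.2⟩

theorem iter_pow (l : List Int) (hc : 0 < l.length) (hb : Bin l) (m : Nat) :
    (stepD 1)^[2 ^ m] l = stepD ((2 ^ m : Nat) : Int) l := by
  induction m generalizing l with
  | zero => simp [Function.iterate_one]
  | succ m ih =>
    have hsplit : 2 ^ (m + 1) = 2 ^ m + 2 ^ m := by ring
    rw [hsplit, Function.iterate_add_apply, ih l hc hb]
    have hlen : 0 < (stepD ((2 ^ m : Nat) : Int) l).length := by rw [stepD_length]; exact hc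
    have hbin : Bin (stepD ((2 ^ m : Nat) : Int) l) := stepD_bin _ _ hb
    rw [ih _ hlen hbin, stepD_stepD _ _ hc hb]
    congr 1
    push_cast
    ring

-- ---------- A's loop in terms of stepD ----------

theorem pyGetD_mod (l : List Int) (c : Int) (hc : 1 ≤ c) (hl : l.length = c.toNat) (j : Int) :
    PySem.List.pyGetD l (PySem.Int.mod j c) 0 = l.getD (idxm l.length j) 0 := by
  rw [PySem.Int.mod_eq_emod_of_pos (by omega)]
  have h0 : (0 : Int) ≤ j % c := Int.emod_nonneg _ (by omega)
  have h1 : j % c < c := Int.emod_lt_of_pos _ (by omega)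
  rw [PySem.List.pyGetD_eq_getElem _ _ h0 (by omega)]
  have hix : idxm l.length j = (j % c).toNat := by
    unfold idxm
    rw [hl]
    congr 2
    omega
  rw [hix, List.getD_eq_getElem _ _ (by omega)]

theorem caStepA_eq_stepD (l : List Int) (c : Int) (hc : 1 ≤ c) (hl : l.length = c.toNat) :
    caStepA l c = stepD 1 l := by
  unfold caStepA stepD
  rw [PySem.List.foldl_append_singleton_eq_map, List.nil_append]
  have hcc : c = ((c.toNat : Nat) : Int) := by omega
  rw [hcc, PySem.List.pyRange_zero_natCast, List.map_map, hl]
  refine List.map_congr_left (fun k hk => ?_)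
  simp only [Function.comp_apply]
  rw [← hcc, pyGetD_mod l c hc hl, pyGetD_mod l c hc hl, hl]

theorem foldA (c : Int) (hc : 1 ≤ c) :
    ∀ (L : List Int) (st acc : List Int), st.length = c.toNat → Bin st →
    (L.foldl (fun (p : List Int × List Int) _ =>
        let ns := caStepA p.1 c
        (ns, p.2 ++ ns)) (st, acc))
    = ((stepD 1)^[L.length] st,
       acc ++ ((List.range L.length).map (fun n => (stepD 1)^[n+1] st)).flatten) := by
  intro L
  induction L with
  | nil => intro st acc h1 h2; simp
  | cons x t ih =>
    intro st acc h1 h2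
    simp only [List.foldl_cons]
    rw [caStepA_eq_stepD st c hc h1]
    rw [ih (stepD 1 st) (acc ++ stepD 1 st) (by rw [stepD_length, h1]) (stepD_bin _ _ h2)]
    refine Prod.ext rfl ?_
    show (acc ++ stepD 1 st) ++ _ = acc ++ _
    rw [List.length_cons, List.range_succ_eq_map, List.map_cons, List.map_map,
        List.flatten_cons, List.append_assoc]
    congr 2

theorem bitsA_eq (seed : String) (steps c : Int) (hc : 1 ≤ c) (hs : 1 ≤ steps)
    (hlen : (caStateInitA seed c).length = c.toNat) (hbin : Bin (caStateInitA seed c)) :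
    caBitsA seed steps c
      = ((List.range steps.toNat).map (fun n => (stepD 1)^[n+1] (caStateInitA seed c))).flatten := by
  unfold caBitsA
  obtain ⟨n, hn⟩ : ∃ n : Nat, steps = (n : Int) := ⟨steps.toNat, by omega⟩
  rw [hn, PySem.List.pyRange_zero_natCast, foldA c hc _ _ _ hlen hbin]
  simp

-- ---------- B's binary-lifting step in terms of stepD ----------

theorem rot_getD (l : List Int) (k i : Nat) (hk : k ≤ l.length) (hi : i < l.length) :
    (l.drop k ++ l.take k).getD i 0 = l.getD ((i + k) % l.length) 0 := by
  rw [List.getD_eq_getElem?_getD, List.getD_eq_getElem?_getD]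
  by_cases h : i < l.length - k
  · rw [List.getElem?_append, if_pos (by simpa using h), List.getElem?_drop,
        Nat.mod_eq_of_lt (by omega), Nat.add_comm]
  · rw [List.getElem?_append, if_neg (by simpa using h), List.length_drop,
        List.getElem?_take_of_lt (by omega), Nat.mod_eq_sub_mod (by omega),
        Nat.mod_eq_of_lt (by omega)]
    have e : i - (l.length - k) = i + k - l.length := by omega
    rw [e]

theorem slice_negfrom (l : List Int) (s : Int) (h0 : 0 < s) (hs : s < l.length) :
    PySem.List.slice l (some (-s)) none = l.drop (l.length - s.toNat) := by
  simp only [PySem.List.slice, PySem.List.clampIdx]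
  rw [if_pos (by omega), if_neg (by omega)]
  have h1 : ((l.length : Int) + -s).toNat = l.length - s.toNat := by omega
  rw [h1]
  exact List.take_of_length_le (by simp)

theorem slice_negto (l : List Int) (s : Int) (h0 : 0 < s) (hs : s < l.length) :
    PySem.List.slice l none (some (-s)) = l.take (l.length - s.toNat) := by
  simp only [PySem.List.slice, PySem.List.clampIdx]
  rw [if_pos (by omega), if_neg (by omega)]
  have h1 : ((l.length : Int) + -s).toNat = l.length - s.toNat := by omega
  rw [h1, List.drop_zero]
  simp

theorem slice_all (l : List Int) : PySem.List.slice l none none = l := by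
  simp [PySem.List.slice]

theorem emod_add_cast (n : Nat) (i : Nat) (d : Int) (k : Nat)
    (hk : d % (n : Int) = (k : Int)) :
    ((i : Int) + d) % (n : Int) = (((i + k) % n : Nat) : Int) := by
  have hdk : d ≡ (k : Int) [ZMOD (n : Int)] := by
    show d % (n : Int) = (k : Int) % (n : Int)
    conv_rhs => rw [← hk]
    exact (Int.emod_emod_of_dvd _ dvd_rfl).symm
  calc ((i : Int) + d) % (n : Int) = ((i : Int) + (k : Int)) % (n : Int) :=
        Int.ModEq.add (Int.ModEq.refl _) hdk
    _ = (((i + k) % n : Nat) : Int) := by push_cast; ring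

theorem emod_sub_cast (n : Nat) (i : Nat) (d : Int) (k : Nat) (hkn : k ≤ n)
    (hk : d % (n : Int) = (k : Int)) :
    ((i : Int) - d) % (n : Int) = (((i + (n - k)) % n : Nat) : Int) := by
  have hdk : d ≡ (k : Int) [ZMOD (n : Int)] := by
    show d % (n : Int) = (k : Int) % (n : Int)
    conv_rhs => rw [← hk]
    exact (Int.emod_emod_of_dvd _ dvd_rfl).symm
  calc ((i : Int) - d) % (n : Int) = ((i : Int) - (k : Int)) % (n : Int) :=
        Int.ModEq.sub (Int.ModEq.refl _) hdk
    _ = (((i : Int) - (k : Int)) + (n : Int)) % (n : Int) := (Int.add_emod_right _ _).symm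
    _ = (((i + (n - k) : Nat) : Int)) % (n : Int) := by congr 1; omega
    _ = (((i + (n - k)) % n : Nat) : Int) := (Int.natCast_mod _ _).symm

theorem rowStepB_eq_stepD (src : List Int) (c d : Int) (hc : 1 ≤ c)
    (hl : src.length = c.toNat) :
    rowStepB src (PySem.Int.mod d c) = stepD d src := by
  have hn : 0 < src.length := by omega
  have hcn : c = (src.length : Int) := by omega
  rw [PySem.Int.mod_eq_emod_of_pos (by omega)]
  have h0s : 0 ≤ d % c := Int.emod_nonneg _ (by omega)
  have hsc : d % c < c := Int.emod_lt_of_pos _ (by omega)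
  have hdmod : d % (src.length : Int) = (((d % c).toNat : Nat) : Int) := by
    rw [← hcn]; omega
  have hleft : PySem.List.slice src (some (d % c)) none ++ PySem.List.slice src none (some (d % c))
      = src.drop (d % c).toNat ++ src.take (d % c).toNat := by
    rw [PySem.List.slice_from _ h0s, PySem.List.slice_to _ h0s]
  have hright : (if d % c ≠ 0 then
        PySem.List.slice src (some (-(d % c))) none ++ PySem.List.slice src none (some (-(d % c)))
      else PySem.List.slice src none none)
      = src.drop (src.length - (d % c).toNat) ++ src.take (src.length - (d % c).toNat) := by
    by_cases hs0 : d % c = 0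
    · rw [if_neg (by simp [hs0]), slice_all, hs0]
      simp
    · rw [if_pos hs0, slice_negfrom src _ (by omega) (by omega),
          slice_negto src _ (by omega) (by omega)]
  unfold rowStepB
  simp only [hleft, hright]
  have hsnn : (d % c).toNat < src.length := by omega
  refine List.ext_getElem (by simp [stepD_length]; omega) ?_
  intro i h1 h2
  have hin : i < src.length := by simpa [stepD_length] using h2
  rw [stepD_getElem _ _ _ h2]
  rw [List.getElem_map, List.getElem_zip]
  rw [show (src.drop (d % c).toNat ++ src.take (d % c).toNat)[i]'(by simpa using by omega)
      = (src.drop (d % c).toNat ++ src.take (d % c).toNat).getD i 0 from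
      (List.getD_eq_getElem _ _ (by simp; omega)).symm]
  rw [show (src.drop (src.length - (d % c).toNat) ++ src.take (src.length - (d % c).toNat))[i]'(by simpa using by omega)
      = (src.drop (src.length - (d % c).toNat) ++ src.take (src.length - (d % c).toNat)).getD i 0 from
      (List.getD_eq_getElem _ _ (by simp; omega)).symm]
  rw [rot_getD src ((d % c).toNat) i (by omega) hin,
      rot_getD src (src.length - (d % c).toNat) i (by omega) hin]
  have e1 : idxm src.length ((i : Int) + d) = (i + (d % c).toNat) % src.length := by
    unfold idxm
    rw [emod_add_cast src.length i d ((d % c).toNat) hdmod]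
    omega
  have e2 : idxm src.length ((i : Int) - d) = (i + (src.length - (d % c).toNat)) % src.length := by
    unfold idxm
    rw [emod_sub_cast src.length i d ((d % c).toNat) (by omega) hdmod]
    omega
  rw [e1, e2]
  exact PySem.Int.bxor_comm _ _

-- ---------- B's rows fold ----------

theorem foldB (seed : String) (c : Int) (hc : 1 ≤ c)
    (hlen : (caStateInitA seed c).length = c.toNat) (hbin : Bin (caStateInitA seed c)) :
    ∀ n : Nat,
    (PySem.List.pyRange 1 ((n : Int) + 1) 1).foldl (fun rows t =>
        let d : Int := (1 : Int) <<< (PySem.Int.bitLength t - 1)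
        rows ++ [rowStepB (PySem.List.pyGetD rows (t - d) []) (PySem.Int.mod d c)])
      [caStateInitA seed c]
    = (List.range (n + 1)).map (fun j => (stepD 1)^[j] (caStateInitA seed c)) := by
  intro n
  induction n with
  | zero =>
    rw [show ((0 : Nat) : Int) + 1 = 1 by norm_num,
        show PySem.List.pyRange 1 1 1 = [] from rfl]
    simp
  | succ n ih =>
    set s0 := caStateInitA seed c with hs0
    have hup : (((n + 1 : Nat) : Int) + 1) = ((n : Int) + 1) + 1 := by push_cast; ring
    rw [hup, PySem.List.pyRange_one_succ_right (by omega), List.foldl_append, ih,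
        List.foldl_cons, List.foldl_nil]
    -- the appended step at t = n+1
    set t : Int := (n : Int) + 1 with ht
    have htN : t = ((n + 1 : Nat) : Int) := by push_cast; omega
    have htabs : t.natAbs = n + 1 := by omega
    set bl := PySem.Int.bitLength t with hbl
    have hlt' : t.natAbs < 2 ^ bl := PySem.Int.lt_two_pow_bitLength t
    have hbl1 : 1 ≤ bl := by
      by_contra h
      have : bl = 0 := by omega
      rw [this] at hlt'
      omega
    set m := bl - 1 with hm
    have hle : 2 ^ m ≤ n + 1 := by
      have h2 := PySem.Int.two_pow_bitLength_le t (by omega)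
      rw [← hbl, ← hm] at h2
      omega
    have hlt : n + 1 < 2 ^ (m + 1) := by
      have hblm : bl = m + 1 := by omega
      rw [hblm] at hlt'
      omega
    have hd : (1 : Int) <<< m = ((2 ^ m : Nat) : Int) := by
      rw [Int.shiftLeft_eq]
      push_cast
      ring
    have hk : t - ((2 ^ m : Nat) : Int) = ((n + 1 - 2 ^ m : Nat) : Int) := by
      have h1 : (1 : Nat) ≤ 2 ^ m := Nat.one_le_two_pow
      omega
    have hget : PySem.List.pyGetD
        ((List.range (n + 1)).map (fun j => (stepD 1)^[j] s0)) ((n + 1 - 2 ^ m : Nat) : Int) []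
        = (stepD 1)^[n + 1 - 2 ^ m] s0 := by
      rw [PySem.List.pyGetD_natCast]
      have hklt : n + 1 - 2 ^ m < n + 1 := by
        have h1 : (1 : Nat) ≤ 2 ^ m := Nat.one_le_two_pow
        omega
      rw [List.getD_eq_getElem _ _ (by simpa using hklt), List.getElem_map, List.getElem_range]
    have hrow : rowStepB ((stepD 1)^[n + 1 - 2 ^ m] s0) (PySem.Int.mod ((2 ^ m : Nat) : Int) c)
        = (stepD 1)^[n + 1] s0 := by
      have hfl := iter_len_bin s0 hbin (n + 1 - 2 ^ m)
      rw [rowStepB_eq_stepD _ c _ hc (by rw [hfl.1, hlen])]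
      have hfl0 : 0 < ((stepD 1)^[n + 1 - 2 ^ m] s0).length := by rw [hfl.1]; omega
      rw [← iter_pow _ hfl0 hfl.2 m, ← Function.iterate_add_apply]
      congr 1
      omega
    simp only [hd, hk, hget, hrow]
    conv_rhs => rw [List.range_succ]
    rw [List.map_append]
    rfl
theorem bitsB_eq (seed : String) (steps c : Int) (hc : 1 ≤ c) (hs : 1 ≤ steps)
    (hlen : (caStateInitA seed c).length = c.toNat) (hbin : Bin (caStateInitA seed c))
    (hinit : (caSeedB seed c).map pyIntOfDigitChar = caStateInitA seed c) :
    caStreamB seed steps c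
      = ((List.range steps.toNat).map (fun n => (stepD 1)^[n+1] (caStateInitA seed c))).flatten := by
  unfold caStreamB
  rw [if_neg (by omega)]
  rw [hinit]
  have hss : steps = ((steps.toNat : Nat) : Int) := by omega
  rw [hss, foldB seed c hc hlen hbin steps.toNat]
  simp only [PySem.List.slice_from _ (by norm_num : (0 : Int) ≤ 1), Int.toNat_natCast]
  rw [List.range_succ_eq_map, List.map_cons, show ((1 : Int).toNat) = 1 from rfl,
      List.drop_one, List.tail_cons, List.map_map]
  rw [List.flatMap_def, List.map_map]
  refine congrArg List.flatten (List.map_congr_left (fun k _ => ?_))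
  rfl

-- ---------- seed facts (shared padding) ----------

theorem caSeedB_length (s : String) (cells : Int)
    (h : PySem.List.slice s.toList none (some cells) ≠ []) (hc : 1 ≤ cells) :
    (caSeedB s cells).length = cells.toNat := by
  unfold caSeedB
  rw [PySem.List.slice_to _ (by omega : (0:Int) ≤ cells)] at h
  simp only [PySem.List.slice_to _ (by omega : (0:Int) ≤ cells)]
  set l := s.toList.take cells.toNat with hl
  have hl1 : 1 ≤ l.length := by
    have := List.length_pos_of_ne_nil h
    omega
  split_ifs with hshort
  · simp only [List.length_take, PySem.List.pyRepeat, List.length_flatten]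
    have hq := (PySem.Int.floordiv_eq_iff_of_pos (a := cells) (b := (l.length : Int))
        (by exact_mod_cast hl1)).mp rfl
    set q := PySem.Int.floordiv cells (l.length : Int) with hqdef
    have hq0 : 0 ≤ q := by
      by_contra hneg
      have h1 : q + 1 ≤ 0 := by omega
      have : (q+1) * (l.length : Int) ≤ 0 :=
        mul_nonpos_of_nonpos_of_nonneg h1 (by exact_mod_cast Nat.zero_le _)
      omega
    have hcast : ((q+1).toNat * l.length : Int) = (q+1) * l.length := by
      push_cast [Int.toNat_of_nonneg (by omega : (0:Int) ≤ q+1)]; ring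
    have hlen : (List.replicate (q+1).toNat l).map List.length = List.replicate (q+1).toNat l.length := by
      simp
    rw [hlen]
    have hsum : (List.replicate (q + 1).toNat l.length).sum = (q+1).toNat * l.length := by
      simp [List.sum_replicate]
    rw [hsum]
    have hcl : cells.toNat ≤ (q+1).toNat * l.length := by zify; rw [hcast]; omega
    omega
  · simp only [not_lt] at hshort
    simp only [hl, List.length_take] at hshort ⊢
    omega

theorem caSeedB_mem (s : String) (cells : Int) :
    ∀ ch ∈ caSeedB s cells, ch ∈ PySem.List.slice s.toList none (some cells) := by
  intro ch hch
  have heq : caSeedB s cells =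
      (if (((PySem.List.slice s.toList none (some cells)).length : Int) < cells)
       then PySem.List.slice (PySem.List.pyRepeat (PySem.List.slice s.toList none (some cells))
              (PySem.Int.floordiv cells ((PySem.List.slice s.toList none (some cells)).length : Int) + 1)) none (some cells)
       else PySem.List.slice s.toList none (some cells)) := rfl
  rw [heq] at hch
  split_ifs at hch
  · simp only [PySem.List.slice, PySem.List.pyRepeat] at hch
    have h2 := List.mem_of_mem_drop (List.mem_of_mem_take hch)
    simp only [List.mem_flatten, List.mem_replicate] at h2
    obtain ⟨w, ⟨-, rfl⟩, hw⟩ := h2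
    exact hw
  · exact hch

theorem slice_map {α β : Type} (f : α → β) (l : List α) (a b : Option Int) :
    PySem.List.slice (l.map f) a b = (PySem.List.slice l a b).map f := by
  simp [PySem.List.slice, PySem.List.clampIdx, List.map_take, List.map_drop]

theorem pyRepeat_map {α β : Type} (f : α → β) (l : List α) (n : Int) :
    PySem.List.pyRepeat (l.map f) n = (PySem.List.pyRepeat l n).map f := by
  simp [PySem.List.pyRepeat]

theorem caStateInitA_eq_map (s : String) (cells : Int) :
    caStateInitA s cells = (caSeedB s cells).map pyIntOfDigitChar := by
  unfold caStateInitA caSeedB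
  simp only [slice_map, pyRepeat_map, List.length_map]
  split_ifs with h <;> rfl

theorem digit_eq (c : Char) (h : c = '0' ∨ c = '1') :
    pyIntOfDigitChar c = if c = '1' then 1 else 0 := by
  rcases h with rfl | rfl <;> decide

-- ---------- the bit streams agree, and are binary ----------

theorem s0_facts (s : String) (cells : Int)
    (hne : PySem.List.slice s.toList none (some cells) ≠ [])
    (hbin : ∀ ch ∈ PySem.List.slice s.toList none (some cells), ch = '0' ∨ ch = '1')
    (hc : 1 ≤ cells) :
    (caStateInitA s cells).length = cells.toNat ∧ Bin (caStateInitA s cells) := by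
  constructor
  · rw [caStateInitA_eq_map, List.length_map]
    exact caSeedB_length s cells hne hc
  · rw [caStateInitA_eq_map]
    intro x hx
    obtain ⟨ch, hch, rfl⟩ := List.mem_map.mp hx
    rw [digit_eq ch (hbin ch (caSeedB_mem s cells ch hch))]
    split_ifs <;> simp

theorem pv_bits_eq (s : String) (steps cells : Int)
    (hne : PySem.List.slice s.toList none (some cells) ≠ [])
    (hbin : ∀ ch ∈ PySem.List.slice s.toList none (some cells), ch = '0' ∨ ch = '1')
    (hc : 1 ≤ cells) (hs : 1 ≤ steps) : caBitsA s steps cells = caStreamB s steps cells := by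
  obtain ⟨hlen, hbin0⟩ := s0_facts s cells hne hbin hc
  rw [bitsA_eq s steps cells hc hs hlen hbin0,
      bitsB_eq s steps cells hc hs hlen hbin0 (caStateInitA_eq_map s cells).symm]

theorem pv_bitsA_binary (s : String) (steps cells : Int)
    (hne : PySem.List.slice s.toList none (some cells) ≠ [])
    (hbin : ∀ ch ∈ PySem.List.slice s.toList none (some cells), ch = '0' ∨ ch = '1')
    (hc : 1 ≤ cells) (hs : 1 ≤ steps) : Bin (caBitsA s steps cells) := by
  obtain ⟨hlen, hbin0⟩ := s0_facts s cells hne hbin hc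
  rw [bitsA_eq s steps cells hc hs hlen hbin0]
  intro b hbm
  obtain ⟨row, hrow, hb⟩ := List.mem_flatten.mp hbm
  obtain ⟨j, -, rfl⟩ := List.mem_map.mp hrow
  exact (iter_len_bin _ hbin0 (j+1)).2 b hb

-- ---------- chunk values / keys ----------

theorem binfold_aux (chunk : List Int) (hb : ∀ b ∈ chunk, b = 0 ∨ b = 1) :
    ∀ acc : Int, (chunk.flatMap (fun b => (PySem.Int.toStr b).toList)).foldl
        (fun a c => 2 * a + (if c = '1' then 1 else 0)) acc
      = chunk.foldl (fun n b => 2 * n + b) acc := by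
  induction chunk with
  | nil => intro acc; rfl
  | cons b t ih =>
    intro acc
    rw [List.flatMap_cons, List.foldl_append, List.foldl_cons]
    rcases hb b (by simp) with rfl | rfl
    · rw [show (PySem.Int.toStr 0).toList = ['0'] from rfl]
      simpa using ih (fun x hx => hb x (by simp [hx])) (2 * acc + 0)
    · rw [show (PySem.Int.toStr 1).toList = ['1'] from rfl]
      simpa using ih (fun x hx => hb x (by simp [hx])) (2 * acc + 1)

-- the 4-bit key read at position p of the stream (shared shape of both inner loops)
def keyAt (bits : List Int) (p : Int) : Int :=
  (if ((PySem.List.slice bits (some p) (some (p + 4))).length : Int) < 4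
   then PySem.List.slice bits none (some 4)
   else PySem.List.slice bits (some p) (some (p + 4))).foldl (fun k b => 2 * k + b) 0

def keysRec (bits : List Int) : Int → List Int → List Int
  | _, [] => []
  | p, _ :: vs => keyAt bits p :: keysRec bits (p + 4) vs

theorem chunk_bin (bits : List Int) (hb : Bin bits) (p : Int) :
    Bin (if ((PySem.List.slice bits (some p) (some (p + 4))).length : Int) < 4
         then PySem.List.slice bits none (some 4)
         else PySem.List.slice bits (some p) (some (p + 4))) := by
  intro x hx
  apply hb
  split_ifs at hx <;>
    · simp only [PySem.List.slice] at hx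
      exact List.mem_of_mem_drop (List.mem_of_mem_take hx)

theorem keyfold_bound (chunk : List Int) (hb : Bin chunk) :
    ∀ acc : Int, 0 ≤ acc →
      0 ≤ chunk.foldl (fun k b => 2 * k + b) acc ∧
      chunk.foldl (fun k b => 2 * k + b) acc < (acc + 1) * 2 ^ chunk.length := by
  induction chunk with
  | nil => intro acc h; exact ⟨h, by simp⟩
  | cons b t ih =>
    intro acc h
    simp only [List.foldl_cons, List.length_cons]
    have hb0 : b = 0 ∨ b = 1 := hb b (by simp)
    have := ih (fun x hx => hb x (by simp [hx])) (2 * acc + b) (by rcases hb0 with rfl | rfl <;> omega)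
    refine ⟨this.1, lt_of_lt_of_le this.2 ?_⟩
    have h2 : (0:Int) < 2 ^ t.length := by positivity
    rcases hb0 with rfl | rfl <;> · rw [pow_succ]; nlinarith

theorem slice_length_le (bits : List Int) (p : Int) :
    (PySem.List.slice bits (some p) (some (p + 4))).length ≤ 4 ∧
    (PySem.List.slice bits none (some 4)).length ≤ 4 := by
  constructor
  · simp only [PySem.List.slice, PySem.List.clampIdx, List.length_take, List.length_drop]
    split_ifs <;> omega
  · simp only [PySem.List.slice, PySem.List.clampIdx, List.length_take, List.length_drop]
    split_ifs <;> omega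

theorem keyAt_bound (bits : List Int) (hb : Bin bits) (p : Int) :
    0 ≤ keyAt bits p ∧ keyAt bits p < 16 := by
  unfold keyAt
  have hcb := chunk_bin bits hb p
  have hlen : (if ((PySem.List.slice bits (some p) (some (p + 4))).length : Int) < 4
       then PySem.List.slice bits none (some 4)
       else PySem.List.slice bits (some p) (some (p + 4))).length ≤ 4 := by
    split_ifs
    · exact (slice_length_le bits p).2
    · exact (slice_length_le bits p).1
  obtain ⟨h0, h1⟩ := keyfold_bound _ hcb 0 le_rfl
  refine ⟨h0, lt_of_lt_of_le h1 ?_⟩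
  have : (2:Int) ^ (if ((PySem.List.slice bits (some p) (some (p + 4))).length : Int) < 4
       then PySem.List.slice bits none (some 4)
       else PySem.List.slice bits (some p) (some (p + 4))).length ≤ 2 ^ 4 :=
    pow_le_pow_right₀ (by norm_num) hlen
  omega

theorem keysRec_bound (bits : List Int) (hb : Bin bits) :
    ∀ (vals : List Int) (p : Int), ∀ k ∈ keysRec bits p vals, 0 ≤ k ∧ k < 16 := by
  intro vals
  induction vals with
  | nil => intro p k hk; cases hk
  | cons v t ih =>
    intro p k hk
    rcases List.mem_cons.mp hk with rfl | hk
    · exact keyAt_bound bits hb p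
    · exact ih _ _ hk

-- ---------- A's inner loop produces keysRec ----------

theorem innerA (bits : List Int) (hb : Bin bits) :
    ∀ (vals : List Int) (acc : List Int) (idx : Int),
    vals.foldl (fun (q : List Int × Int) _ =>
        let chunk0 := PySem.List.slice bits (some q.2) (some (q.2 + 4))
        let i' := q.2 + 4
        let chunk := if ((chunk0.length : Int) < 4) then PySem.List.slice bits none (some 4) else chunk0
        (q.1 ++ [chunkValA chunk], i')) (acc, idx)
    = (acc ++ keysRec bits idx vals, idx + 4 * (vals.length : Int)) := by
  intro vals
  induction vals with
  | nil => intro acc idx; simp [keysRec]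
  | cons v t ih =>
    intro acc idx
    simp only [List.foldl_cons]
    rw [ih]
    have hkey : chunkValA (if ((PySem.List.slice bits (some idx) (some (idx + 4))).length : Int) < 4
        then PySem.List.slice bits none (some 4)
        else PySem.List.slice bits (some idx) (some (idx + 4))) = keyAt bits idx := by
      unfold chunkValA pyIntOfBinChars keyAt
      exact binfold_aux _ (chunk_bin bits hb idx) 0
    rw [hkey]
    simp only [keysRec, List.length_cons, Prod.mk.injEq]
    constructor
    · rw [List.append_assoc]; rfl
    · push_cast; ring

-- ---------- B's inner loop: bucket fold ----------

theorem pySetD_eq_set {α : Type} (xs : List α) (i : Int) (v : α) (h0 : 0 ≤ i) (h1 : i < xs.length) :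
    PySem.List.pySetD xs i v = xs.set i.toNat v := by
  simp [PySem.List.pySetD, PySem.List.pySet?, PySem.List.pyIdx?, h0, h1]

theorem pyGetD_toNat {α : Type} (xs : List α) (i : Int) (d : α) (h0 : 0 ≤ i) (h1 : i < xs.length) :
    PySem.List.pyGetD xs i d = xs.getD i.toNat d := by
  rw [PySem.List.pyGetD_eq_getElem _ _ h0 (by exact_mod_cast h1),
      List.getD_eq_getElem _ _ (by omega)]

theorem innerB (bits : List Int) (hb : Bin bits) :
    ∀ (vals : List Int) (bk : List (List Int)) (idx : Int), bk.length = 16 →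
    vals.foldl (fun (q : List (List Int) × Int) v =>
        let chunk0 := PySem.List.slice bits (some q.2) (some (q.2 + 4))
        let i' := q.2 + 4
        let chunk := if ((chunk0.length : Int) < 4) then PySem.List.slice bits none (some 4) else chunk0
        let key := chunkValA chunk
        (PySem.List.pySetD q.1 key (PySem.List.pyGetD q.1 key [] ++ [v]), i')) (bk, idx)
    = ((List.range 16).map (fun u =>
          bk.getD u [] ++ (((keysRec bits idx vals).zip vals).filter (fun p => decide (p.1 = (u : Int)))).map (fun p => p.2)),
       idx + 4 * (vals.length : Int)) := by
  intro vals
  induction vals with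
  | nil =>
    intro bk idx hbk
    simp only [List.foldl_nil, keysRec, List.zip_nil_left, List.filter_nil, List.map_nil,
      List.append_nil, List.length_nil]
    refine Prod.ext ?_ (by simp)
    show bk = _
    refine List.ext_getElem (by simp [hbk]) ?_
    intro u h1 h2
    rw [List.getElem_map, List.getElem_range, List.getD_eq_getElem _ _ (by omega)]
  | cons v t ih =>
    intro bk idx hbk
    simp only [List.foldl_cons]
    obtain ⟨hk0, hk16⟩ := keyAt_bound bits hb idx
    have hstep : (PySem.List.pySetD bk (keyAt bits idx) (PySem.List.pyGetD bk (keyAt bits idx) [] ++ [v]), idx + 4)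
        = (bk.set (keyAt bits idx).toNat (bk.getD (keyAt bits idx).toNat [] ++ [v]), idx + 4) := by
      rw [pySetD_eq_set bk _ _ hk0 (by rw [hbk]; omega),
          pyGetD_toNat bk _ _ hk0 (by rw [hbk]; omega)]
    have hkeq : chunkValA (if ((PySem.List.slice bits (some idx) (some (idx + 4))).length : Int) < 4
        then PySem.List.slice bits none (some 4)
        else PySem.List.slice bits (some idx) (some (idx + 4))) = keyAt bits idx := by
      unfold chunkValA pyIntOfBinChars keyAt
      exact binfold_aux _ (chunk_bin bits hb idx) 0
    rw [show (let chunk0 := PySem.List.slice bits (some idx) (some (idx + 4));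
        let i' := idx + 4;
        let chunk := if ((chunk0.length : Int) < 4) then PySem.List.slice bits none (some 4) else chunk0
        let key := chunkValA chunk
        (PySem.List.pySetD bk key (PySem.List.pyGetD bk key [] ++ [v]), i'))
        = (bk.set (keyAt bits idx).toNat (bk.getD (keyAt bits idx).toNat [] ++ [v]), idx + 4) from by
      show (PySem.List.pySetD bk (chunkValA _) (PySem.List.pyGetD bk (chunkValA _) [] ++ [v]), idx + 4) = _
      rw [hkeq]
      exact hstep]
    rw [ih _ _ (by rw [List.length_set, hbk])]
    simp only [Prod.mk.injEq]
    refine ⟨?_, by push_cast [List.length_cons]; ring⟩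
    refine List.map_congr_left (fun u hu => ?_)
    have hu16 : u < 16 := List.mem_range.mp hu
    have hgd : (bk.set (keyAt bits idx).toNat (bk.getD (keyAt bits idx).toNat [] ++ [v])).getD u []
        = if (keyAt bits idx).toNat = u then bk.getD u [] ++ [v] else bk.getD u [] := by
      rw [List.getD_eq_getElem _ _ (by simp [hbk]; omega), List.getElem_set]
      split_ifs with h
      · rw [← h]
      · exact (List.getD_eq_getElem _ _ (by rw [hbk]; omega)).symm
    rw [hgd]
    have hkr : keysRec bits idx (v :: t) = keyAt bits idx :: keysRec bits (idx + 4) t := rfl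
    rw [hkr, List.zip_cons_cons, List.filter_cons]
    by_cases hcase : (keyAt bits idx).toNat = u
    · rw [if_pos hcase, if_pos (by simp; omega)]
      rw [List.map_cons, List.append_assoc, List.singleton_append]
    · rw [if_neg hcase, if_neg (by simp; omega)]

-- ---------- stable sort = bucket concatenation ----------

def flatFilters (pairs : List (Int × Int)) : List (Int × Int) :=
  ((List.range 16).map (fun (v : Nat) => pairs.filter (fun p => decide (p.1 = (v : Int))))).flatten

theorem insertBy_append (before : (Int × Int) → (Int × Int) → Bool) (x : Int × Int) :
    ∀ (A B : List (Int × Int)), (∀ y ∈ A, before x y = false) → (∀ y ∈ B, before x y = true) →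
    PySem.List.insertBy before x (A ++ B) = A ++ x :: B := by
  intro A
  induction A with
  | nil =>
    intro B hA hB
    cases B with
    | nil => simp [PySem.List.insertBy]
    | cons b t => simp [PySem.List.insertBy, hB b (by simp)]
  | cons a A' ih =>
    intro B hA hB
    have h1 : before x a = false := hA a (by simp)
    simp only [List.cons_append]
    rw [show PySem.List.insertBy before x (a :: (A' ++ B))
        = if before x a then x :: a :: (A' ++ B) else a :: PySem.List.insertBy before x (A' ++ B) by
      simp [PySem.List.insertBy]]
    rw [h1]
    simp only [Bool.false_eq_true, if_false]
    rw [ih B (fun y hy => hA y (by simp [hy])) hB]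

theorem insert_flatFilters (pairs : List (Int × Int)) (x : Int × Int)
    (hx : 0 ≤ x.1 ∧ x.1 < 16) :
    PySem.List.insertBy (fun a b => decide (a.1 < b.1)) x (flatFilters pairs)
      = flatFilters (pairs ++ [x]) := by
  set k := x.1.toNat with hkdef
  have hk16 : k < 16 := by omega
  have hkx : (k : Int) = x.1 := by omega
  have hsplit : List.range 16 = List.range' 0 (k + 1) ++ List.range' (k + 1) (15 - k) := by
    have h := List.range'_append (s := 0) (m := k + 1) (n := 15 - k) (step := 1)
    rw [show 0 + 1 * (k + 1) = k + 1 by ring] at h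
    rw [show (k + 1) + (15 - k) = 16 by omega] at h
    rw [List.range_eq_range', ← h]
  have hsplit2 : List.range' 0 (k + 1) = List.range' 0 k ++ [k] := by
    have h := List.range'_append (s := 0) (m := k) (n := 1) (step := 1)
    rw [show 0 + 1 * k = k by ring] at h
    rw [← h, List.range'_one]
  unfold flatFilters
  rw [hsplit]
  rw [List.map_append, List.flatten_append, List.map_append, List.flatten_append]
  have hmemA : ∀ y ∈ ((List.range' 0 (k + 1)).map
      (fun (v : Nat) => pairs.filter (fun p => decide (p.1 = (v : Int))))).flatten,
      (fun (a b : Int × Int) => decide (a.1 < b.1)) x y = false := by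
    intro y hy
    obtain ⟨l, hl, hyl⟩ := List.mem_flatten.mp hy
    obtain ⟨v, hv, rfl⟩ := List.mem_map.mp hl
    have hvk : v < k + 1 := by
      have := List.mem_range'_1.mp hv
      omega
    have hkey := List.of_mem_filter hyl
    simp only [decide_eq_true_eq] at hkey
    simp only [decide_eq_false_iff_not, not_lt]
    rw [hkey]
    omega
  have hmemB : ∀ y ∈ ((List.range' (k + 1) (15 - k)).map
      (fun (v : Nat) => pairs.filter (fun p => decide (p.1 = (v : Int))))).flatten,
      (fun (a b : Int × Int) => decide (a.1 < b.1)) x y = true := by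
    intro y hy
    obtain ⟨l, hl, hyl⟩ := List.mem_flatten.mp hy
    obtain ⟨v, hv, rfl⟩ := List.mem_map.mp hl
    have hvk : k + 1 ≤ v := (List.mem_range'_1.mp hv).1
    have hkey := List.of_mem_filter hyl
    simp only [decide_eq_true_eq] at hkey
    simp only [decide_eq_true_eq]
    rw [hkey]
    omega
  rw [insertBy_append _ x _ _ hmemA hmemB]
  have hfx : ∀ v : Nat, [x].filter (fun p => decide (p.1 = (v : Int)))
      = if v = k then [x] else [] := by
    intro v
    by_cases hv : v = k
    · subst hv
      simp [← hkx]
    · have : ¬ (x.1 = (v : Int)) := by omega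
      simp [this, hv]
  have hBpart : (List.range' (k + 1) (15 - k)).map
        (fun (v : Nat) => (pairs ++ [x]).filter (fun p => decide (p.1 = (v : Int))))
      = (List.range' (k + 1) (15 - k)).map
        (fun (v : Nat) => pairs.filter (fun p => decide (p.1 = (v : Int)))) := by
    refine List.map_congr_left (fun v hv => ?_)
    have hvk : k + 1 ≤ v := (List.mem_range'_1.mp hv).1
    rw [List.filter_append, hfx v, if_neg (by omega), List.append_nil]
  have hApart : ((List.range' 0 (k + 1)).map
        (fun (v : Nat) => (pairs ++ [x]).filter (fun p => decide (p.1 = (v : Int))))).flatten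
      = ((List.range' 0 (k + 1)).map
        (fun (v : Nat) => pairs.filter (fun p => decide (p.1 = (v : Int))))).flatten ++ [x] := by
    rw [hsplit2, List.map_append, List.flatten_append, List.map_append, List.flatten_append]
    have h1 : (List.range' 0 k).map
          (fun (v : Nat) => (pairs ++ [x]).filter (fun p => decide (p.1 = (v : Int))))
        = (List.range' 0 k).map (fun (v : Nat) => pairs.filter (fun p => decide (p.1 = (v : Int)))) := by
      refine List.map_congr_left (fun v hv => ?_)
      have hvk : v < k := by
        have := List.mem_range'_1.mp hv
        omega
      rw [List.filter_append, hfx v, if_neg (by omega), List.append_nil]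
    rw [h1, List.map_singleton, List.flatten_cons, List.flatten_nil, List.append_nil,
        List.filter_append, hfx k, if_pos rfl, List.map_singleton, List.flatten_cons,
        List.flatten_nil, List.append_nil, List.append_assoc]
  rw [hApart, hBpart, List.append_assoc, List.singleton_append]

theorem sorted_eq_flatFilters (pairs : List (Int × Int))
    (hp : ∀ p ∈ pairs, 0 ≤ p.1 ∧ p.1 < 16) :
    PySem.List.sorted pairs (fun x => x.1) false = flatFilters pairs := by
  induction pairs using List.reverseRecOn with
  | nil =>
    rw [PySem.List.sorted_eq_foldl_insertBy]
    simp [flatFilters]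
  | append_singleton l x ih =>
    rw [PySem.List.sorted_eq_foldl_insertBy, List.foldl_append, List.foldl_cons, List.foldl_nil,
        ← PySem.List.sorted_eq_foldl_insertBy]
    rw [ih (fun p hp' => hp p (by simp [hp']))]
    exact insert_flatFilters l x (hp x (by simp))

-- ---------- per-rule equality ----------

theorem init16_getD (u : Nat) :
    ((PySem.List.pyRange 0 16 1).map (fun _ => ([] : List Int))).getD u [] = [] := by
  rw [show (PySem.List.pyRange 0 16 1).map (fun _ => ([] : List Int)) = List.replicate 16 [] from rfl]
  rcases lt_or_ge u 16 with h | h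
  · rw [List.getD_eq_getElem _ _ (by simpa using h)]
    interval_cases u <;> rfl
  · rw [List.getD_eq_default _ _ (by simpa using h)]

theorem perRule (bits : List Int) (hb : Bin bits) (vals : List Int) (idx : Int) :
    (PySem.List.sorted ((keysRec bits idx vals).zip vals) (fun x => x.1) false).map (fun x => x.2)
      = ((List.range 16).map (fun u =>
            ((PySem.List.pyRange 0 16 1).map (fun _ => ([] : List Int))).getD u []
            ++ (((keysRec bits idx vals).zip vals).filter (fun p => decide (p.1 = (u : Int)))).map (fun p => p.2))).flatMap (fun b => b) := by
  have hp : ∀ p ∈ (keysRec bits idx vals).zip vals, 0 ≤ p.1 ∧ p.1 < 16 := by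
    intro p hpm
    exact keysRec_bound bits hb vals idx p.1 (List.of_mem_zip hpm).1
  rw [sorted_eq_flatFilters _ hp]
  unfold flatFilters
  rw [List.map_flatten, List.map_map, List.flatMap_def]
  refine congrArg List.flatten ?_
  rw [List.map_map]
  refine List.map_congr_left (fun u _ => ?_)
  simp only [Function.comp_apply, init16_getD, List.nil_append]

-- ---------- outer loops ----------

theorem outer_loop (bits : List Int) (hb : Bin bits) :
    ∀ (items : List (String × List Int)) (d : PySem.Dict String (List Int)) (idx : Int),
    items.foldl (fun (st : PySem.Dict String (List Int) × Int) rv =>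
        let inner := rv.2.foldl (fun (q : List Int × Int) _ =>
            let chunk0 := PySem.List.slice bits (some q.2) (some (q.2 + 4))
            let i' := q.2 + 4
            let chunk := if ((chunk0.length : Int) < 4) then PySem.List.slice bits none (some 4) else chunk0
            (q.1 ++ [chunkValA chunk], i')) ([], st.2)
        let paired := PySem.List.sorted (inner.1.zip rv.2) (fun x => x.1) false
        (st.1.insert rv.1 (paired.map (fun x => x.2)), inner.2)) (d, idx)
    = items.foldl (fun (st : PySem.Dict String (List Int) × Int) rv =>
        let inner := rv.2.foldl (fun (q : List (List Int) × Int) v =>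
            let chunk0 := PySem.List.slice bits (some q.2) (some (q.2 + 4))
            let i' := q.2 + 4
            let chunk := if ((chunk0.length : Int) < 4) then PySem.List.slice bits none (some 4) else chunk0
            let key := chunkValA chunk
            (PySem.List.pySetD q.1 key (PySem.List.pyGetD q.1 key [] ++ [v]), i'))
          ((PySem.List.pyRange 0 16 1).map (fun _ => ([] : List Int)), st.2)
        (st.1.insert rv.1 (inner.1.flatMap (fun b => b)), inner.2)) (d, idx) := by
  intro items
  induction items with
  | nil => intro d idx; rfl
  | cons rv t ih =>
    intro d idx
    simp only [List.foldl_cons]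
    rw [innerA bits hb rv.2 [] idx, innerB bits hb rv.2 _ idx (by rfl)]
    simp only [List.nil_append]
    rw [perRule bits hb rv.2 idx]
    exact ih _ _

-- the all-empty-values path: every value list in the built dict is []
theorem dict_empty_values (l : List (String × List Int))
    (h : l.all (fun p => p.2.isEmpty) = true) :
    ∀ rv ∈ (l.foldl (fun d p => d.insert p.1 p.2)
        (PySem.Dict.empty : PySem.Dict String (List Int))).items, rv.2 = [] := by
  have main : ∀ (t : List (String × List Int)) (d : PySem.Dict String (List Int)),
      (∀ p ∈ t, p.2 = []) → (∀ rv ∈ d.items, rv.2 = []) →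
      ∀ rv ∈ (t.foldl (fun d p => d.insert p.1 p.2) d).items, rv.2 = [] := by
    intro t
    induction t with
    | nil => intro d h1 h2; exact h2
    | cons p tl ih =>
      intro d h1 h2
      simp only [List.foldl_cons]
      apply ih
      · intro q hq; exact h1 q (by simp [hq])
      · intro rv hrv
        rcases (PySem.Dict.mem_items_insert _ _ _ _).mp hrv with hv | ⟨hmem, -⟩
        · rw [hv]; exact h1 p (by simp)
        · exact h2 _ hmem
  apply main
  · intro p hp
    have := List.all_eq_true.mp h p hp
    simpa [List.isEmpty_iff] using this
  · intro rv hrv; cases hrv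

-- with every value list empty, neither side ever consults its bit stream
theorem outer_empty (bitsA bitsB : List Int) :
    ∀ (items : List (String × List Int)), (∀ rv ∈ items, rv.2 = []) →
    ∀ (p : PySem.Dict String (List Int) × Int),
    items.foldl (fun (st : PySem.Dict String (List Int) × Int) rv =>
        let inner := rv.2.foldl (fun (q : List Int × Int) _ =>
            let chunk0 := PySem.List.slice bitsA (some q.2) (some (q.2 + 4))
            let i' := q.2 + 4
            let chunk := if ((chunk0.length : Int) < 4) then PySem.List.slice bitsA none (some 4) else chunk0
            (q.1 ++ [chunkValA chunk], i')) ([], st.2)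
        let paired := PySem.List.sorted (inner.1.zip rv.2) (fun x => x.1) false
        (st.1.insert rv.1 (paired.map (fun x => x.2)), inner.2)) p
    = items.foldl (fun (st : PySem.Dict String (List Int) × Int) rv =>
        let inner := rv.2.foldl (fun (q : List (List Int) × Int) v =>
            let chunk0 := PySem.List.slice bitsB (some q.2) (some (q.2 + 4))
            let i' := q.2 + 4
            let chunk := if ((chunk0.length : Int) < 4) then PySem.List.slice bitsB none (some 4) else chunk0
            let key := chunkValA chunk
            (PySem.List.pySetD q.1 key (PySem.List.pyGetD q.1 key [] ++ [v]), i'))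
          ((PySem.List.pyRange 0 16 1).map (fun _ => ([] : List Int)), st.2)
        (st.1.insert rv.1 (inner.1.flatMap (fun b => b)), inner.2)) p := by
  intro items
  induction items with
  | nil => intro _ p; rfl
  | cons rv t ih =>
    intro h p
    obtain ⟨k, v⟩ := rv
    have hv : v = [] := h (k, v) (by simp)
    subst hv
    simp only [List.foldl_cons, List.foldl_nil]
    have hflat : (((PySem.List.pyRange 0 16 1).map (fun _ => ([] : List Int))).flatMap (fun b => b))
        = ([] : List Int) := by rfl
    rw [hflat]
    have hsort : (PySem.List.sorted ((([] : List Int)).zip ([] : List Int)) (fun x : Int × Int => x.1) false).map (fun x => x.2) = ([] : List Int) := by rfl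
    rw [hsort]
    exact ih (fun q hq => h q (by simp [hq])) _

-- ===== VERDICT (by name: the statement is the Claim_ definition above) =====
theorem shuffle_sbox_with_ca_spec : Claim_equal_shuffle_sbox_with_ca := by
  intro original_sbox seed_bits ca_steps ca_cells hdom hpre
  unfold Spec_shuffle_sbox_with_ca shuffle_sbox_with_ca shuffle_sbox_with_ca_alt
  rcases hpre with ⟨hc, hne, hsteps, hbinb⟩ | ⟨hc, hne, hdig, hemp⟩ | ⟨hc, hdig, hemp⟩
  · have hbin : ∀ c ∈ PySem.List.slice seed_bits.toList none (some ca_cells), c = '0' ∨ c = '1' := by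
      intro c hcm
      have := List.all_eq_true.mp hbinb c hcm
      simpa using this
    rw [pv_bits_eq seed_bits ca_steps ca_cells hne hbin hc hsteps]
    have hbinbits : Bin (caStreamB seed_bits ca_steps ca_cells) := by
      rw [← pv_bits_eq seed_bits ca_steps ca_cells hne hbin hc hsteps]
      exact pv_bitsA_binary seed_bits ca_steps ca_cells hne hbin hc hsteps
    exact congrArg (fun p => p.1.items)
      (outer_loop (caStreamB seed_bits ca_steps ca_cells) hbinbits
        (original_sbox.foldl (fun d p => d.insert p.1 p.2) PySem.Dict.empty).items
        PySem.Dict.empty 0)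
  all_goals
    exact congrArg (fun p => p.1.items)
      (outer_empty (caBitsA seed_bits ca_steps ca_cells) (caStreamB seed_bits ca_steps ca_cells)
        (original_sbox.foldl (fun d p => d.insert p.1 p.2) PySem.Dict.empty).items
        (dict_empty_values original_sbox hemp) (PySem.Dict.empty, 0))
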